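-- pv_equiv track=rewrite | github.com/hinderling/keyword_spotting | find_keyword_labels.py | find_keyword_labels_in_valid_all_occurrences
-- ===== SOURCE A (Python) =====
-- def find_keyword_labels_in_valid_all_occurrences(list_keywords, list_valid_words, list_valid_labels):
--     list_keywords_in_valid = []
--     dict_keyword_valid_labels = {}
--     for index_keyword in range(len(list_keywords)):  # search for each word in keywords
--         for word in list_valid_words:  # search through all words for it
--             if word == list_keywords[index_keyword]:  # Hit!
--                 indices_words_in_transcript = \
--                     [index for index, current_word in enumerate(list_valid_words) if current_word == word]
--                 dict_keyword_valid_labels[list_keywords[index_keyword]] = \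
--                     [list_valid_labels[found_indices] for found_indices in indices_words_in_transcript]
--                 list_keywords_in_valid.append(list_keywords[index_keyword])
--     return dict_keyword_valid_labels
-- ===== SOURCE B (Python) =====
-- def find_keyword_labels_in_valid_all_occurrences(list_keywords, list_valid_words, list_valid_labels):
--     # one pass: word -> labels of all its occurrences, then O(1) keyword lookups
--     word_labels = {}
--     for word, label in zip(list_valid_words, list_valid_labels):
--         word_labels[word] = word_labels.get(word, []) + [label]
--     return {keyword: word_labels[keyword]
--             for keyword in list_keywords if keyword in word_labels}
-- ===== Notes on version B (the rewrite author's own statement) =====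
-- stated objective: faster
-- what changed: Replaced the nested scans (for each keyword, scan all valid words and re-enumerate all occurrences on every hit) by one pass that groups labels by word into a dict, followed by O(1) lookups per keyword.
import Mathlib
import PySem

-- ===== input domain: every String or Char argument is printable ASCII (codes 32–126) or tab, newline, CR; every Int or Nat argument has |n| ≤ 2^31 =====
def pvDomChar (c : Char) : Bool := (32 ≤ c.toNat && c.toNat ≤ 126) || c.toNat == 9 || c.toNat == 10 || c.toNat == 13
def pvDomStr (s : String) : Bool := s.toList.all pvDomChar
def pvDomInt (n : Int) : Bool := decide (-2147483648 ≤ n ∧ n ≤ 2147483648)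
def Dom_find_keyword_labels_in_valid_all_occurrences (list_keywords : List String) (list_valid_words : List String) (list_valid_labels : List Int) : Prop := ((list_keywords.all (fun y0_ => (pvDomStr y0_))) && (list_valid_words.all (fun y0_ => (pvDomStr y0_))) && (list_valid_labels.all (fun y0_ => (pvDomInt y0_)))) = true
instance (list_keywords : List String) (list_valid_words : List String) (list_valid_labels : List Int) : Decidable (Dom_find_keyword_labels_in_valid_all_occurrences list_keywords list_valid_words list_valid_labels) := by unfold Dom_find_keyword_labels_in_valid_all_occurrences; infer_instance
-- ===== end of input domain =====

-- B replaces A's nested scans by a single grouping pass over zip(words, labels) plus O(1) dict lookups per keyword (measured faster).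

-- ===== PORT A =====
-- literal transliteration of A: for index_keyword in range(len(list_keywords)): for word in list_valid_words: on a hit,
-- recompute the occurrence indices by enumerate+filter, index list_valid_labels at each (pyGetD; in range under Pre_),
-- overwrite the dict entry and append to the (unused) list; return the dict.
def find_keyword_labels_in_valid_all_occurrences (list_keywords : List String) (list_valid_words : List String) (list_valid_labels : List Int) : List (String × List Int) :=
  let st := (PySem.List.pyRange 0 (list_keywords.length : Int) 1).foldl
    (fun (st : List String × PySem.Dict String (List Int)) index_keyword =>
      list_valid_words.foldl
        (fun st word =>
          if word == PySem.List.pyGetD list_keywords index_keyword "" then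
            let indices_words_in_transcript :=
              ((PySem.List.enumerate list_valid_words 0).filter
                (fun p => p.2 == word)).map (fun p => p.1)
            let labels := indices_words_in_transcript.map
              (fun found_indices => PySem.List.pyGetD list_valid_labels found_indices 0)
            (st.1 ++ [PySem.List.pyGetD list_keywords index_keyword ""],
             st.2.insert (PySem.List.pyGetD list_keywords index_keyword "") labels)
          else st)
        st)
    (([] : List String), (PySem.Dict.empty : PySem.Dict String (List Int)))
  st.2.items

-- ===== PORT B =====
-- literal transliteration of Source B: one pass over zip(list_valid_words, list_valid_labels) grouping labels by word,
-- then a dict comprehension over list_keywords keeping the keywords present in word_labels.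
def find_keyword_labels_in_valid_all_occurrences_alt (list_keywords : List String) (list_valid_words : List String) (list_valid_labels : List Int) : List (String × List Int) :=
  let word_labels := (list_valid_words.zip list_valid_labels).foldl
    (fun (d : PySem.Dict String (List Int)) p => d.modify p.1 [] (fun v => v ++ [p.2]))
    PySem.Dict.empty
  (list_keywords.foldl
    (fun (d : PySem.Dict String (List Int)) keyword =>
      if word_labels.contains keyword then d.insert keyword (word_labels.getD keyword []) else d)
    PySem.Dict.empty).items

-- ===== PRECONDITION & SPEC =====
-- Pre_ excludes exactly the inputs where A raises IndexError: a keyword occurring in list_valid_words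
-- at a position ≥ len(list_valid_labels); A returns normally on every other input.
def Pre_find_keyword_labels_in_valid_all_occurrences (list_keywords : List String) (list_valid_words : List String) (list_valid_labels : List Int) : Prop :=
  ∀ w ∈ list_valid_words.drop list_valid_labels.length, w ∉ list_keywords
instance (list_keywords : List String) (list_valid_words : List String) (list_valid_labels : List Int) : Decidable (Pre_find_keyword_labels_in_valid_all_occurrences list_keywords list_valid_words list_valid_labels) := by unfold Pre_find_keyword_labels_in_valid_all_occurrences; infer_instance
def pvWitness_find_keyword_labels_in_valid_all_occurrences : List String × List String × List Int :=
  (["a", "c"], ["a", "b", "a"], [1, 2, 3])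
def Spec_find_keyword_labels_in_valid_all_occurrences (list_keywords : List String) (list_valid_words : List String) (list_valid_labels : List Int) (out : List (String × List Int)) : Prop := out = find_keyword_labels_in_valid_all_occurrences_alt list_keywords list_valid_words list_valid_labels
instance (list_keywords : List String) (list_valid_words : List String) (list_valid_labels : List Int) (out : List (String × List Int)) : Decidable (Spec_find_keyword_labels_in_valid_all_occurrences list_keywords list_valid_words list_valid_labels out) := by unfold Spec_find_keyword_labels_in_valid_all_occurrences; infer_instance

-- ===== CLAIM (what is proved, stated in full; the proofs are below) =====
def Claim_equal_find_keyword_labels_in_valid_all_occurrences : Prop := ∀ (list_keywords : List String) (list_valid_words : List String) (list_valid_labels : List Int), Dom_find_keyword_labels_in_valid_all_occurrences list_keywords list_valid_words list_valid_labels → Pre_find_keyword_labels_in_valid_all_occurrences list_keywords list_valid_words list_valid_labels → Spec_find_keyword_labels_in_valid_all_occurrences list_keywords list_valid_words list_valid_labels (find_keyword_labels_in_valid_all_occurrences list_keywords list_valid_words list_valid_labels)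

-- ===== LEMMAS AND PROOFS =====

-- A's occurrence-labels list for a keyword kw (index list, then labels).
def pvLabA (ws : List String) (ls : List Int) (kw : String) : List Int :=
  (((PySem.List.enumerate ws 0).filter (fun p => p.2 == kw)).map (fun p => p.1)).map
    (fun j => PySem.List.pyGetD ls j 0)

-- A's inner loop: repeated overwrite with the same entry collapses to one insert (or nothing).
theorem pvInnerA (kw : String) (V : List Int) :
    ∀ (l : List String) (st : List String × PySem.Dict String (List Int)),
    (l.foldl (fun st word => if word == kw then (st.1 ++ [kw], st.2.insert kw V) else st) st).2
      = if kw ∈ l then st.2.insert kw V else st.2 := by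
  intro l
  induction l with
  | nil => intro st; simp
  | cons w l ih =>
    intro st
    by_cases hw : w = kw
    · subst hw
      simp only [List.foldl_cons, beq_self_eq_true, if_pos, List.mem_cons, true_or]
      rw [ih]
      split_ifs <;> simp [PySem.Dict.insert_insert_self]
    · have hb : (w == kw) = false := by simp [hw]
      have hm : (kw ∈ w :: l) ↔ kw ∈ l := by
        simp only [List.mem_cons, or_iff_right_iff_imp]
        intro h; exact absurd h.symm hw
      simp only [List.foldl_cons, hb, Bool.false_eq_true, if_false, hm]
      exact ih st

-- A's outer loop, dict component only.
theorem pvOuterA (ws : List String) (ls : List Int) :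
    ∀ (ks : List String) (st : List String × PySem.Dict String (List Int)),
    (ks.foldl (fun st kw =>
        ws.foldl (fun st word =>
          if word == kw then (st.1 ++ [kw], st.2.insert kw (pvLabA ws ls kw)) else st) st) st).2
      = ks.foldl (fun d kw => if kw ∈ ws then d.insert kw (pvLabA ws ls kw) else d) st.2 := by
  intro ks
  induction ks with
  | nil => intro st; rfl
  | cons k ks ih =>
    intro st
    simp only [List.foldl_cons]
    rw [ih, pvInnerA]

-- the body of A's inner branch is pvLabA of the scanned word; when it matches kw they coincide.
theorem pvLabA_congr (ws : List String) (ls : List Int) (w kw : String) (h : (w == kw) = true) :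
    pvLabA ws ls w = pvLabA ws ls kw := by
  rw [eq_of_beq h]

-- first components of zip: the words that get a label.
theorem pvZipFst (ws : List String) : ∀ (ls : List Int),
    (ws.zip ls).map Prod.fst = ws.take ls.length := by
  induction ws with
  | nil => intro ls; simp
  | cons w ws ih =>
    intro ls
    cases ls with
    | nil => simp
    | cons l ls => simp [ih]

-- if kw occurs nowhere in ws, the enumerate filter is empty.
theorem pvFilterEnumNil (ws : List String) (s : Int) (kw : String)
    (h : ∀ w ∈ ws, w ≠ kw) :
    (PySem.List.enumerate ws s).filter (fun p => p.2 == kw) = [] := by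
  rw [List.filter_eq_nil_iff]
  intro p hp
  rw [PySem.List.mem_enumerate_iff] at hp
  obtain ⟨k, hk, rfl⟩ := hp
  simpa using h _ (List.getElem_mem hk)

-- THE CRUX: grouping labels by word over zip equals A's enumerate-filter-index computation,
-- provided kw has no occurrence at a position ≥ len ls (offset s generalized for the induction).
theorem pvCrux (ws : List String) : ∀ (s : Nat) (ls : List Int) (kw : String),
    s ≤ ls.length →
    (∀ w ∈ ws.drop (ls.length - s), w ≠ kw) →
    ((ws.zip (ls.drop s)).filter (fun p => p.1 == kw)).map Prod.snd
      = ((PySem.List.enumerate ws (s : Int)).filter (fun p => p.2 == kw)).map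
          (fun p => PySem.List.pyGetD ls p.1 0) := by
  induction ws with
  | nil => intro s ls kw _ _; simp [PySem.List.enumerate]
  | cons w ws ih =>
    intro s ls kw hs h
    by_cases hlt : s < ls.length
    · rw [List.drop_eq_getElem_cons hlt]
      rw [PySem.List.enumerate_cons]
      by_cases hw : (w == kw) = true
      · simp only [List.zip_cons_cons, List.filter_cons, hw, if_pos, List.map_cons]
        have h1 : PySem.List.pyGetD ls (s : Int) 0 = ls[s] := by
          rw [PySem.List.pyGetD_natCast, List.getD_eq_getElem?_getD, List.getElem?_eq_getElem hlt]
          rfl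
        have h2 : ((s : Int) + 1) = ((s + 1 : Nat) : Int) := by push_cast; ring
        rw [h1, h2, ← ih (s + 1) ls kw hlt]
        intro x hx
        apply h
        have : ls.length - s = (ls.length - (s + 1)) + 1 := by omega
        rw [this, List.drop_succ_cons] at *
        exact hx
      · simp only [List.zip_cons_cons, List.filter_cons, hw, if_neg, Bool.false_eq_true,
          not_false_iff]
        have h2 : ((s : Int) + 1) = ((s + 1 : Nat) : Int) := by push_cast; ring
        rw [h2, ← ih (s + 1) ls kw hlt]
        intro x hx
        apply h
        have : ls.length - s = (ls.length - (s + 1)) + 1 := by omega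
        rw [this, List.drop_succ_cons] at *
        exact hx
    · have hse : s = ls.length := by omega
      have hdrop : ls.drop s = [] := by
        apply List.drop_eq_nil_of_le; omega
      have hall : ∀ x ∈ w :: ws, x ≠ kw := by
        have : ls.length - s = 0 := by omega
        simpa [this] using h
      rw [hdrop, pvFilterEnumNil _ _ _ hall]
      simp

-- B's lookup dict characterized.
theorem pvWlGetD (ws : List String) (ls : List Int) (kw : String) :
    ((ws.zip ls).foldl (fun (d : PySem.Dict String (List Int)) p =>
        d.modify p.1 [] (fun v => v ++ [p.2])) PySem.Dict.empty).getD kw []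
      = ((ws.zip ls).filter (fun p => p.1 == kw)).map Prod.snd := by
  rw [PySem.Dict.getD_foldl_modify_append]
  simp [PySem.Dict.getD_empty]

theorem pvWlContains (ws : List String) (ls : List Int) (kw : String) :
    ((ws.zip ls).foldl (fun (d : PySem.Dict String (List Int)) p =>
        d.modify p.1 [] (fun v => v ++ [p.2])) PySem.Dict.empty).contains kw
      = true ↔ kw ∈ ws.take ls.length := by
  rw [PySem.Dict.contains_iff_mem_keys, PySem.Dict.keys_foldl_modify_key]
  rw [PySem.Dict.keys_empty]
  rw [PySem.Set.mem_update]
  simp [pvZipFst]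

-- ===== VERDICT (by name: the statement is the Claim_ definition above) =====
theorem find_keyword_labels_in_valid_all_occurrences_spec : Claim_equal_find_keyword_labels_in_valid_all_occurrences := by
  intro ks ws ls _ hpre
  unfold Spec_find_keyword_labels_in_valid_all_occurrences
  unfold find_keyword_labels_in_valid_all_occurrences find_keyword_labels_in_valid_all_occurrences_alt
  simp only []
  -- rewrite A's outer range-loop into a fold over ks
  rw [PySem.List.foldl_pyRange_zero_pyGetD' ks ""
    (f := fun (st : List String × PySem.Dict String (List Int)) kw =>
      ws.foldl (fun st word =>
        if word == kw then
          (st.1 ++ [kw], st.2.insert kw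
            ((((PySem.List.enumerate ws 0).filter (fun p => p.2 == word)).map (fun p => p.1)).map
              (fun j => PySem.List.pyGetD ls j 0)))
        else st) st)]
  congr 1
  -- normalize the inserted value: on the true branch word = kw
  have hbody : ∀ (st : List String × PySem.Dict String (List Int)) (kw : String),
      ws.foldl (fun st word =>
        if word == kw then (st.1 ++ [kw], st.2.insert kw (pvLabA ws ls word)) else st) st
      = ws.foldl (fun st word =>
        if word == kw then (st.1 ++ [kw], st.2.insert kw (pvLabA ws ls kw)) else st) st := by
    intro st kw
    apply PySem.List.foldl_congr_mem
    intro acc x _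
    by_cases hx : (x == kw) = true
    · simp only [hx, if_pos, pvLabA_congr ws ls x kw hx]
    · simp [hx]
  have hA : (ks.foldl (fun (st : List String × PySem.Dict String (List Int)) kw =>
      ws.foldl (fun st word =>
        if word == kw then (st.1 ++ [kw], st.2.insert kw (pvLabA ws ls word)) else st) st)
      ([], PySem.Dict.empty)).2
      = ks.foldl (fun (d : PySem.Dict String (List Int)) kw =>
          if kw ∈ ws then d.insert kw (pvLabA ws ls kw) else d) PySem.Dict.empty := by
    have : (ks.foldl (fun (st : List String × PySem.Dict String (List Int)) kw =>
        ws.foldl (fun st word =>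
          if word == kw then (st.1 ++ [kw], st.2.insert kw (pvLabA ws ls word)) else st) st)
        ([], PySem.Dict.empty))
        = (ks.foldl (fun (st : List String × PySem.Dict String (List Int)) kw =>
        ws.foldl (fun st word =>
          if word == kw then (st.1 ++ [kw], st.2.insert kw (pvLabA ws ls kw)) else st) st)
        ([], PySem.Dict.empty)) := by
      apply PySem.List.foldl_congr_mem
      intro acc kw _
      exact hbody acc kw
    rw [this, pvOuterA]
  show (ks.foldl _ (([] : List String), (PySem.Dict.empty : PySem.Dict String (List Int)))).2 = _
  rw [show (fun (st : List String × PySem.Dict String (List Int)) kw =>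
      ws.foldl (fun st word =>
        if word == kw then
          (st.1 ++ [kw], st.2.insert kw
            ((((PySem.List.enumerate ws 0).filter (fun p => p.2 == word)).map (fun p => p.1)).map
              (fun j => PySem.List.pyGetD ls j 0)))
        else st) st)
    = (fun (st : List String × PySem.Dict String (List Int)) kw =>
      ws.foldl (fun st word =>
        if word == kw then (st.1 ++ [kw], st.2.insert kw (pvLabA ws ls word)) else st) st)
    from rfl]
  rw [hA]
  -- now compare the two keyword folds pointwise on members of ks
  apply PySem.List.foldl_congr_mem
  intro d kw hkw
  set wl := (ws.zip ls).foldl (fun (d : PySem.Dict String (List Int)) p =>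
      d.modify p.1 [] (fun v => v ++ [p.2])) PySem.Dict.empty with hwl
  have hpre_kw : ∀ w ∈ ws.drop ls.length, w ≠ kw := by
    intro w hw heq
    exact hpre w hw (heq ▸ hkw)
  have hmem : kw ∈ ws ↔ kw ∈ ws.take ls.length := by
    constructor
    · intro h
      rcases List.mem_append.mp ((List.take_append_drop ls.length ws) ▸ h) with h1 | h1
      · exact h1
      · exact absurd rfl (hpre_kw kw h1)
    · intro h; exact List.mem_of_mem_take h
  by_cases hin : kw ∈ ws
  · have hc : wl.contains kw = true := (pvWlContains ws ls kw).mpr (hmem.mp hin)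
    simp only [hin, if_pos, hc]
    congr 1
    rw [pvWlGetD]
    have := pvCrux ws 0 ls kw (Nat.zero_le _) (by simpa using hpre_kw)
    simp only [List.drop_zero, Int.natCast_zero] at this
    rw [this]
    unfold pvLabA
    rw [List.map_map]
    rfl
  · have hc : wl.contains kw = false := by
      cases h : wl.contains kw with
      | false => rfl
      | true => exact absurd (List.mem_of_mem_take ((pvWlContains ws ls kw).mp h)) hin
    simp [hin, hc]
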